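-- pv_equiv track=rewrite | github.com/Longthor-VACHOUAXIONG/HaoXai | routes/extraction.py | create_standard_table
-- ===== SOURCE A (Python) =====
-- def create_standard_table(samples, max_rows=8, num_columns=12, format_for_pcr_cdna=False):
--     """Create standard table without H2O"""
--     table = []
--     for col in range(num_columns):
--         column = []
--         for row in range(max_rows):
--             index = col * max_rows + row
--             if index < len(samples):
--                 sample_name = samples[index]
--                 if format_for_pcr_cdna and '_' in sample_name:
--                     sample_name = sample_name.replace('_', '\n')
--                 column.append(sample_name)
--             else:
--                 column.append('')
--         table.append(column)
--
--     # Transpose to get rows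
--     table = list(zip(*table))
--     table = [list(row) for row in table]
--     return table
-- ===== SOURCE B (Python) =====
-- def create_standard_table(samples, max_rows=8, num_columns=12, format_for_pcr_cdna=False):
--     """Create standard table without H2O"""
--     if max_rows <= 0 or num_columns <= 0:
--         return []  # empty grid
--
--     def cell(index):
--         if index < len(samples):
--             name = samples[index]
--             if format_for_pcr_cdna and '_' in name:
--                 name = name.replace('_', '\n')
--             return name
--         return ''
--
--     return [[cell(col * max_rows + row) for col in range(num_columns)]
--             for row in range(max_rows)]
-- ===== Notes on version B (the rewrite author's own statement) =====
-- stated objective: simpler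
-- what changed: B builds the row-major table directly with a single nested comprehension (row index outer, column index inner), eliminating A's column buffers and the zip(*table) transpose pass.
import Mathlib
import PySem

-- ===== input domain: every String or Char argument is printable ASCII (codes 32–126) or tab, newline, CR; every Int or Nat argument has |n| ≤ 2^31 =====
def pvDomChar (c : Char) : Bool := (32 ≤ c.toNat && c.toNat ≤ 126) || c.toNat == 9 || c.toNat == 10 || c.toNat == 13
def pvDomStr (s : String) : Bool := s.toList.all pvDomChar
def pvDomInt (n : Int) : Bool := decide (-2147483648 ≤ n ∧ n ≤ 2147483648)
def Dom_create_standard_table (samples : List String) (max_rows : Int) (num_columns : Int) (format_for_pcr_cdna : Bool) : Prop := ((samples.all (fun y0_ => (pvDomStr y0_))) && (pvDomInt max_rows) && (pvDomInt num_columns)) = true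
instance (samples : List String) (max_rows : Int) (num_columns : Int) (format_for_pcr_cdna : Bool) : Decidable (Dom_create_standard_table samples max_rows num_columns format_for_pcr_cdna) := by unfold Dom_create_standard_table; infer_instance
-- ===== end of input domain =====

-- B builds the row-major table directly with one nested comprehension, dropping A's
-- column buffers and the zip(*table) transpose pass (objective: simpler).

-- ===== PORT A =====
-- the cell value at a flat index: samples[index] ('_' -> '\n' when formatting) or ''
-- (this is exactly the body of A's inner 'if index < len(samples)' branch, and it is
-- also B's 'cell' helper — the code is identical in both Pythons)
def pvCell (samples : List String) (format_for_pcr_cdna : Bool) (index : Int) : String :=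
  if index < (samples.length : Int) then
    -- samples[index]: in both programs 0 ≤ index < len(samples) holds here, so getD "" never fires
    let sample_name := (PySem.List.pyGet? samples index).getD ""
    if format_for_pcr_cdna && PySem.Str.isIn "_" sample_name then
      PySem.Str.replace sample_name "_" "\n"
    else sample_name
  else ""

-- zip(*table) followed by [list(row) for row in …]: tuples of the columns' heads
-- while every column is nonempty (Python's zip stops at the shortest iterable;
-- zip() of no iterables is empty)
def pvZipStar : List (List String) → List (List String)
  | [] => []
  | c :: cs =>
    if c.isEmpty || cs.any (·.isEmpty) then []
    else ((c :: cs).map (fun x => x.headD "")) :: pvZipStar ((c :: cs).map (·.tail))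
termination_by cols => (cols.headD []).length
decreasing_by
  simp_all [List.isEmpty_iff]
  cases c with
  | nil => simp_all
  | cons a t => simp

def create_standard_table (samples : List String) (max_rows : Int) (num_columns : Int) (format_for_pcr_cdna : Bool) : List (List String) :=
  let table := (PySem.List.pyRange 0 num_columns 1).foldl
    (fun table col =>
      let column := (PySem.List.pyRange 0 max_rows 1).foldl
        (fun column row => column ++ [pvCell samples format_for_pcr_cdna (col * max_rows + row)]) []
      table ++ [column]) []
  pvZipStar table

-- ===== PORT B =====
def create_standard_table_alt (samples : List String) (max_rows : Int) (num_columns : Int) (format_for_pcr_cdna : Bool) : List (List String) :=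
  if max_rows ≤ 0 || num_columns ≤ 0 then []  -- empty grid
  else (PySem.List.pyRange 0 max_rows 1).map (fun row =>
    (PySem.List.pyRange 0 num_columns 1).map (fun col =>
      pvCell samples format_for_pcr_cdna (col * max_rows + row)))

-- ===== PRECONDITION & SPEC =====
def Spec_create_standard_table (samples : List String) (max_rows : Int) (num_columns : Int) (format_for_pcr_cdna : Bool) (out : List (List String)) : Prop := out = create_standard_table_alt samples max_rows num_columns format_for_pcr_cdna
instance (samples : List String) (max_rows : Int) (num_columns : Int) (format_for_pcr_cdna : Bool) (out : List (List String)) : Decidable (Spec_create_standard_table samples max_rows num_columns format_for_pcr_cdna out) := by unfold Spec_create_standard_table; infer_instance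

-- ===== CLAIM (what is proved, stated in full; the proofs are below) =====
def Claim_equal_create_standard_table : Prop := ∀ (samples : List String) (max_rows : Int) (num_columns : Int) (format_for_pcr_cdna : Bool), Dom_create_standard_table samples max_rows num_columns format_for_pcr_cdna → Spec_create_standard_table samples max_rows num_columns format_for_pcr_cdna (create_standard_table samples max_rows num_columns format_for_pcr_cdna)

-- ===== LEMMAS AND PROOFS =====

-- l.tail.getD r d = l.getD (r+1) d (both default when l is empty)
theorem pv_tail_getD {α : Type} (l : List α) (r : Nat) (d : α) :
    l.tail.getD r d = l.getD (r + 1) d := by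
  cases l <;> rfl

theorem pv_headD_getD {α : Type} (l : List α) (d : α) :
    l.headD d = l.getD 0 d := by
  cases l <;> rfl

-- pvZipStar on a nonempty list of equal-length columns is the row-major transpose
theorem pvZipStar_eq (R : Nat) (cols : List (List String)) (hne : cols ≠ [])
    (hlen : ∀ c ∈ cols, c.length = R) :
    pvZipStar cols = (List.range R).map (fun r => cols.map (fun c => c.getD r "")) := by
  induction R generalizing cols with
  | zero =>
    obtain ⟨c, cs, rfl⟩ := List.exists_cons_of_ne_nil hne
    have hc : c.isEmpty := by
      simp [List.length_eq_zero_iff.mp (hlen c (by simp))]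
    simp [pvZipStar, hc]
  | succ R ih =>
    obtain ⟨c, cs, rfl⟩ := List.exists_cons_of_ne_nil hne
    have hnonnil : ∀ x ∈ c :: cs, x ≠ [] := by
      intro x hx h
      have := hlen x hx
      rw [h] at this
      simp at this
    have hno : ¬ (c.isEmpty || cs.any (·.isEmpty)) = true := by
      simp only [Bool.or_eq_true, List.any_eq_true, List.isEmpty_iff, not_or, not_exists]
      exact ⟨hnonnil c (by simp), fun x ⟨hx, h⟩ => hnonnil x (by simp [hx]) h⟩
    rw [pvZipStar, if_neg hno]
    have htails : pvZipStar ((c :: cs).map (·.tail)) =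
        (List.range R).map (fun r => ((c :: cs).map (·.tail)).map (fun x => x.getD r "")) := by
      apply ih
      · simp
      · intro t ht
        simp only [List.mem_map] at ht
        obtain ⟨x, hx, rfl⟩ := ht
        have := hlen x hx
        simp [List.length_tail, this]
    rw [htails, List.range_succ_eq_map]
    simp only [List.map_cons, List.map_map, Function.comp_def]
    congr 1
    · rw [pv_headD_getD]
      exact congrArg _ (List.map_congr_left fun x _ => pv_headD_getD x "")
    · apply List.map_congr_left
      intro r _
      rw [pv_tail_getD]
      exact congrArg _ (List.map_congr_left fun x _ => pv_tail_getD x r "")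

-- both programs, in the nonempty case, compute the same row-major grid
theorem pv_main (samples : List String) (max_rows num_columns : Int)
    (fmt : Bool) (hR : 0 < max_rows) (hC : 0 < num_columns) :
    create_standard_table samples max_rows num_columns fmt =
    create_standard_table_alt samples max_rows num_columns fmt := by
  unfold create_standard_table create_standard_table_alt
  simp only [PySem.List.foldl_append_singleton_eq_map, List.nil_append]
  rw [if_neg (by simp; omega)]
  rw [PySem.List.pyRange_one 0 max_rows, PySem.List.pyRange_one 0 num_columns]
  simp only [zero_add, Int.sub_zero, List.map_map, Function.comp_def]
  rw [pvZipStar_eq max_rows.toNat]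
  · apply List.map_congr_left
    intro r hr
    simp only [List.mem_range] at hr
    rw [List.map_map]
    apply List.map_congr_left
    intro c _
    simp only [Function.comp_def]
    rw [PySem.List.getD_map_range _ _ _ _ hr]
  · intro h
    have h0 := congrArg List.length h
    simp at h0
    omega
  · intro col hcol
    simp only [List.mem_map] at hcol
    obtain ⟨k, _, rfl⟩ := hcol
    simp

-- ===== VERDICT (by name: the statement is the Claim_ definition above) =====
theorem create_standard_table_spec : Claim_equal_create_standard_table := by
  intro samples max_rows num_columns fmt _
  unfold Spec_create_standard_table
  by_cases hC : num_columns ≤ 0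
  · -- no columns: A's table is empty, zip(*[]) = []; B's guard returns []
    unfold create_standard_table create_standard_table_alt
    simp [PySem.List.pyRange_one_eq_nil hC, pvZipStar, hC]
  · by_cases hR : max_rows ≤ 0
    · -- columns exist but are all empty: zip stops immediately; B's guard returns []
      unfold create_standard_table create_standard_table_alt
      rw [PySem.List.pyRange_one_cons (by omega : (0:Int) < num_columns)]
      simp [PySem.List.pyRange_one_eq_nil hR, pvZipStar, hR]
    · exact pv_main samples max_rows num_columns fmt (by omega) (by omega)
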